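-- pv_equiv track=rewrite | github.com/JAIME6609/WATER-MODELS | WATER-MODEL-FL-MM-15_en.py | _ext__infer_dims
-- ===== SOURCE A (Python) =====
-- def _ext__infer_dims(n):
--     # Heuristic for factoring n = I*J*T prioritizing small triples.
--     candidates = []
--     for I in range(2, 8):
--         for J in range(2, 8):
--             for T in range(2, 8):
--                 if I*J*T == n:
--                     candidates.append((I,J,T))
--     pref = [(3,3,2), (3,3,3), (4,3,2), (3,4,2), (4,4,2), (5,3,2)]
--     for p in pref:
--         if p in candidates:
--             return p
--     return candidates[0] if candidates else (n,1,1)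
-- ===== SOURCE B (Python) =====
-- def _ext__infer_dims(n):
--     # Two short-circuit passes instead of building the full candidate list.
--     # Every preferred triple has all factors in 2..7, so it is a candidate
--     # exactly when its product is n.
--     pref = [(3, 3, 2), (3, 3, 3), (4, 3, 2), (3, 4, 2), (4, 4, 2), (5, 3, 2)]
--     for p in pref:
--         if p[0] * p[1] * p[2] == n:
--             return p
--     for I in range(2, 8):
--         for J in range(2, 8):
--             for T in range(2, 8):
--                 if I * J * T == n:
--                     return (I, J, T)
--     return (n, 1, 1)
-- ===== Notes on version B (the rewrite author's own statement) =====
-- stated objective: simpler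
-- what changed: B drops the candidates list entirely: it first returns the first preference tuple whose product is n directly, then runs the nested loop with an early return for the first matching triple, instead of A's build-full-index-then-scan-twice.
import Mathlib
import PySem

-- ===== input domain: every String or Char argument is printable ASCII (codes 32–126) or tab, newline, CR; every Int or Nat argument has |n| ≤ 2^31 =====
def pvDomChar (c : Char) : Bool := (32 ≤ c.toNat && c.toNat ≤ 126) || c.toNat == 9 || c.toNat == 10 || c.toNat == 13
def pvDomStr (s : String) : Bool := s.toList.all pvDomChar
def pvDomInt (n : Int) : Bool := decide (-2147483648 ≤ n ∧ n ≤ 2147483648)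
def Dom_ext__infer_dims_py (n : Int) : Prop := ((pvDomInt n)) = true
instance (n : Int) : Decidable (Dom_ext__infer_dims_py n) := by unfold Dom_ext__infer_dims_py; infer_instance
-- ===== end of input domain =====

-- B drops A's candidates list: two short-circuit passes (pref by direct product test,
-- then the nested loop with an early return) instead of build-full-index-then-scan-twice.

-- ===== PORT A =====
-- A: build the full candidates list with three nested loops, then scan pref for
-- a member, then fall back to candidates[0] or (n,1,1).
def ext__infer_dims_py (n : Int) : Int × Int × Int :=
  let candidates : List (Int × Int × Int) :=
    (PySem.List.pyRange 2 8 1).foldl (fun acc I =>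
      (PySem.List.pyRange 2 8 1).foldl (fun acc J =>
        (PySem.List.pyRange 2 8 1).foldl (fun acc T =>
          if I * J * T == n then acc ++ [(I, J, T)] else acc) acc) acc) []
  let pref : List (Int × Int × Int) := [(3,3,2),(3,3,3),(4,3,2),(3,4,2),(4,4,2),(5,3,2)]
  match pref.find? (fun p => candidates.contains p) with
  | some p => p
  | none =>
    match candidates with
    | c :: _ => c
    | [] => (n, 1, 1)

-- ===== PORT B =====
-- B: first short-circuit pass over pref testing the product directly;
-- then the nested loops with an early return (find? over the loop order).
def ext__infer_dims_py_alt (n : Int) : Int × Int × Int :=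
  let pref : List (Int × Int × Int) := [(3,3,2),(3,3,3),(4,3,2),(3,4,2),(4,4,2),(5,3,2)]
  match pref.find? (fun p => p.1 * p.2.1 * p.2.2 == n) with
  | some p => p
  | none =>
    match ((PySem.List.pyRange 2 8 1).flatMap (fun I =>
            (PySem.List.pyRange 2 8 1).flatMap (fun J =>
              (PySem.List.pyRange 2 8 1).map (fun T => (I, J, T))))).find?
            (fun p => p.1 * p.2.1 * p.2.2 == n) with
    | some p => p
    | none => (n, 1, 1)

-- ===== PRECONDITION & SPEC =====
def Spec_ext__infer_dims_py (n : Int) (out : Int × Int × Int) : Prop := out = ext__infer_dims_py_alt n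
instance (n : Int) (out : Int × Int × Int) : Decidable (Spec_ext__infer_dims_py n out) := by unfold Spec_ext__infer_dims_py; infer_instance

-- ===== CLAIM (what is proved, stated in full; the proofs are below) =====
def Claim_equal_ext__infer_dims_py : Prop := ∀ (n : Int), Dom_ext__infer_dims_py n → Spec_ext__infer_dims_py n (ext__infer_dims_py n)

-- ===== LEMMAS AND PROOFS =====

-- find? is determined by the predicate's values on the list's members
theorem find?_congr_mem {α : Type} (l : List α) (P Q : α → Bool)
    (h : ∀ x ∈ l, P x = Q x) : l.find? P = l.find? Q := by
  induction l with
  | nil => rfl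
  | cons a t ih =>
    simp only [List.find?_cons, h a (List.mem_cons_self)]
    exact match Q a with
    | true => rfl
    | false => ih (fun x hx => h x (List.mem_cons_of_mem a hx))

theorem contains_filter_of_mem {α : Type} [BEq α] [LawfulBEq α]
    (L : List α) (P : α → Bool) (p : α) (h : p ∈ L) :
    ((L.filter P).contains p) = P p := by
  cases hP : P p <;> simp [List.mem_filter, h, hP]

theorem ports_agree (n : Int) : ext__infer_dims_py n = ext__infer_dims_py_alt n := by
  unfold ext__infer_dims_py ext__infer_dims_py_alt
  simp only [PySem.List.foldl_append_if, PySem.List.foldl_append_eq_flatMap, List.nil_append]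
  have hC : (((PySem.List.pyRange 2 8 1).flatMap (fun I =>
        (PySem.List.pyRange 2 8 1).flatMap (fun J =>
          (PySem.List.pyRange 2 8 1).map (fun T => (I, J, T))))).filter
        (fun p => p.1 * p.2.1 * p.2.2 == n)) =
      ((PySem.List.pyRange 2 8 1).flatMap (fun I =>
        (PySem.List.pyRange 2 8 1).flatMap (fun J =>
          ((PySem.List.pyRange 2 8 1).filter (fun T => I * J * T == n)).map
            (fun T => (I, J, T))))) := by
    simp only [List.filter_flatMap, List.filter_map, Function.comp_def]
  rw [← hC]
  rw [find?_congr_mem [((3:Int),(3:Int),(2:Int)),(3,3,3),(4,3,2),(3,4,2),(4,4,2),(5,3,2)]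
    _ (fun p => p.1 * p.2.1 * p.2.2 == n)
    (fun p hp => contains_filter_of_mem _ _ p (by fin_cases hp <;> decide))]
  rw [show List.find? (fun p => p.1 * p.2.1 * p.2.2 == n)
        ((PySem.List.pyRange 2 8 1).flatMap (fun I =>
          (PySem.List.pyRange 2 8 1).flatMap (fun J =>
            (PySem.List.pyRange 2 8 1).map (fun T => (I, J, T))))) =
      (((PySem.List.pyRange 2 8 1).flatMap (fun I =>
          (PySem.List.pyRange 2 8 1).flatMap (fun J =>
            (PySem.List.pyRange 2 8 1).map (fun T => (I, J, T))))).filter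
        (fun p => p.1 * p.2.1 * p.2.2 == n)).head? from List.head?_filter.symm]
  cases hf : ((PySem.List.pyRange 2 8 1).flatMap (fun I =>
        (PySem.List.pyRange 2 8 1).flatMap (fun J =>
          (PySem.List.pyRange 2 8 1).map (fun T => (I, J, T))))).filter
        (fun p => p.1 * p.2.1 * p.2.2 == n) <;> rfl

theorem ext__infer_dims_py_spec : Claim_equal_ext__infer_dims_py := by
  intro n _
  exact ports_agree n
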